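-- pv_equiv track=rewrite | github.com/saulrichardson/newsvlm-analysis | scripts/pipelines/manage_newspaper_ordinance_reprints.py | grouped_reprints
-- ===== SOURCE A (Python) =====
-- def clean(value: object) -> str:
--     if value is None:
--         return ""
--     return str(value).strip()
--
-- def grouped_reprints(rows: list[dict[str, str]]) -> dict[str, list[dict[str, str]]]:
--     groups: dict[str, list[dict[str, str]]] = {}
--     for row in rows:
--         group_id = clean(row.get("reprint_group_id"))
--         if not group_id:
--             continue
--         groups.setdefault(group_id, []).append(row)
--     return groups
-- ===== SOURCE B (Python) =====
-- def clean(value: object) -> str: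
--     if value is None:
--         return ""
--     return str(value).strip()
--
-- def grouped_reprints(rows: list[dict[str, str]]) -> dict[str, list[dict[str, str]]]:
--     keys = list(dict.fromkeys(k for k in (clean(row.get("reprint_group_id")) for row in rows) if k))
--     return {k: [row for row in rows if clean(row.get("reprint_group_id")) == k] for k in keys}
-- ===== Notes on version B (the rewrite author's own statement) =====
-- stated objective: alternative
-- what changed: Replaces the single setdefault-append accumulation pass with a two-phase strategy: first collect the distinct non-empty cleaned ids in first-occurrence order (dict.fromkeys), then build each group by filtering the rows per key.
import Mathlib
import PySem

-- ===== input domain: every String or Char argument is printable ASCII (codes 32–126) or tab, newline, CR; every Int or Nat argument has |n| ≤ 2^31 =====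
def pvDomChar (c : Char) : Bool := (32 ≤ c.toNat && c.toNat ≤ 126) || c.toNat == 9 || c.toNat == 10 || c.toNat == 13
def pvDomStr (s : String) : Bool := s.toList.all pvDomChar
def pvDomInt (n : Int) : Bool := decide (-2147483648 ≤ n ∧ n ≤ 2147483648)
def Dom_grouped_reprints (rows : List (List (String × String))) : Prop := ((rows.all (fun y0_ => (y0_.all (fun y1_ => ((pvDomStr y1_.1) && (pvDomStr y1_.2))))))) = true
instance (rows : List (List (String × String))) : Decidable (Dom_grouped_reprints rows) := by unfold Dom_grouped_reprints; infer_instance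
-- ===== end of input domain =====

-- B groups rows in two phases (first-occurrence distinct cleaned ids, then a per-key filter)
-- instead of A's single setdefault-append pass; same return value, alternative decomposition.


-- ===== PORT A =====
-- clean(value): None -> "", else str(value).strip()  (values here are Optional[str])
def pvClean (v : Option String) : String :=
  match v with
  | none => ""
  | some s => PySem.Str.strip s

-- clean(row.get("reprint_group_id")) — used by both Pythons
def pvKey (row : List (String × String)) : String :=
  pvClean ((PySem.Dict.mk row).get? "reprint_group_id")

-- loop body of A: skip empty id, else groups.setdefault(gid, []).append(row)
def pvStep (g : PySem.Dict String (List (List (String × String))))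
    (row : List (String × String)) : PySem.Dict String (List (List (String × String))) :=
  let gid := pvKey row
  if gid = "" then g else g.modify gid [] (fun l => l ++ [row])

def grouped_reprints (rows : List (List (String × String))) : List (String × List (List (String × String))) :=
  (rows.foldl pvStep PySem.Dict.empty).items

-- ===== PORT B =====
def grouped_reprints_alt (rows : List (List (String × String))) : List (String × List (List (String × String))) :=
  let keys := PySem.List.dedup ((rows.map pvKey).filter (fun k => !(k == "")))
  keys.map (fun k => (k, rows.filter (fun row => pvKey row == k)))

-- ===== PRECONDITION & SPEC =====
def Spec_grouped_reprints (rows : List (List (String × String))) (out : List (String × List (List (String × String)))) : Prop := out = grouped_reprints_alt rows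
instance (rows : List (List (String × String))) (out : List (String × List (List (String × String)))) : Decidable (Spec_grouped_reprints rows out) := by unfold Spec_grouped_reprints; infer_instance

-- ===== CLAIM (what is proved, stated in full; the proofs are below) =====
def Claim_equal_grouped_reprints : Prop := ∀ (rows : List (List (String × String))), Dom_grouped_reprints rows → Spec_grouped_reprints rows (grouped_reprints rows)

-- ===== LEMMAS AND PROOFS =====

-- the distinct non-empty cleaned ids, in first-occurrence order
def pvKeys (rows : List (List (String × String))) : List String :=
  PySem.List.dedup ((rows.map pvKey).filter (fun k => !(k == "")))

-- the rows of a given group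
def pvGrp (rows : List (List (String × String))) (k : String) : List (List (String × String)) :=
  rows.filter (fun row => pvKey row == k)

lemma pvKeys_ne_empty {rows : List (List (String × String))} {k : String}
    (h : k ∈ pvKeys rows) : k ≠ "" := by
  unfold pvKeys at h
  rw [PySem.List.mem_dedup] at h
  simp only [List.mem_filter] at h
  simpa using h.2

lemma pvKeys_mem_iff {rows : List (List (String × String))} {k : String} (hk : k ≠ "") :
    k ∈ pvKeys rows ↔ ∃ row ∈ rows, pvKey row = k := by
  unfold pvKeys
  rw [PySem.List.mem_dedup]
  simp [List.mem_filter, List.mem_map, hk]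

lemma pvGrp_eq_nil {rows : List (List (String × String))} {k : String}
    (hk : k ≠ "") (h : k ∉ pvKeys rows) : pvGrp rows k = [] := by
  rw [pvKeys_mem_iff hk] at h
  push Not at h
  unfold pvGrp
  rw [List.filter_eq_nil_iff]
  intro row hrow
  simpa using h row hrow

lemma find?_map_pair {F : String → List (List (String × String))} {K : List String} {k : String} :
    List.find? (fun p => p.1 == k) (K.map (fun k' => (k', F k'))) =
      if k ∈ K then some (k, F k) else none := by
  induction K with
  | nil => simp
  | cons a K ih =>
    by_cases hak : a = k
    · subst hak; simp
    · simp [hak, ih, Ne.symm hak]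

lemma mk_map_get? {F : String → List (List (String × String))} {K : List String} {k : String} :
    (PySem.Dict.mk (K.map (fun k' => (k', F k')))).get? k =
      if k ∈ K then some (F k) else none := by
  simp only [PySem.Dict.get?, find?_map_pair]
  split <;> simp

lemma mk_map_contains {F : String → List (List (String × String))} {K : List String} {k : String} :
    (PySem.Dict.mk (K.map (fun k' => (k', F k')))).contains k = decide (k ∈ K) := by
  rw [PySem.Dict.contains_eq_isSome_get?, mk_map_get?]
  split <;> simp_all

lemma pvKeys_append (rows : List (List (String × String))) (r : List (String × String)) :
    pvKeys (rows ++ [r]) =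
      if pvKey r = "" ∨ pvKey r ∈ pvKeys rows then pvKeys rows
      else pvKeys rows ++ [pvKey r] := by
  unfold pvKeys
  simp only [List.map_append, List.filter_append, List.map_cons, List.map_nil]
  by_cases h0 : pvKey r = ""
  · simp [h0]
  · simp only [List.filter_cons, List.filter_nil]
    rw [show (!(pvKey r == "")) = true by simp [h0]]
    simp only [if_pos]
    rw [PySem.List.dedup, PySem.Set.ofList_eq_foldl, List.foldl_append]
    simp only [List.foldl_cons, List.foldl_nil]
    rw [← PySem.Set.ofList_eq_foldl, ← PySem.List.dedup]
    unfold PySem.Set.add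
    by_cases hm : pvKey r ∈ PySem.List.dedup ((rows.map pvKey).filter (fun k => !(k == "")))
    · simp [h0]
    · simp [h0, List.contains_eq_mem]

lemma pvGrp_append (rows : List (List (String × String))) (r : List (String × String)) (k : String) :
    pvGrp (rows ++ [r]) k = pvGrp rows k ++ (if pvKey r = k then [r] else []) := by
  unfold pvGrp
  rw [List.filter_append]
  congr 1
  simp [List.filter_cons]

lemma main_invariant (rows : List (List (String × String))) :
    rows.foldl pvStep PySem.Dict.empty =
      PySem.Dict.mk ((pvKeys rows).map (fun k => (k, pvGrp rows k))) := by
  induction rows using List.reverseRecOn with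
  | nil => rfl
  | append_singleton rows r ih =>
    rw [List.foldl_append, List.foldl_cons, List.foldl_nil, ih]
    simp only [pvStep]
    by_cases h0 : pvKey r = ""
    · -- empty id: nothing changes
      rw [if_pos h0, pvKeys_append, if_pos (Or.inl h0)]
      congr 1
      apply List.map_congr_left
      intro k hk
      rw [pvGrp_append]
      have hne : pvKey r ≠ k := by
        rw [h0]; exact fun h => pvKeys_ne_empty hk h.symm
      simp [hne]
    · rw [if_neg h0, PySem.Dict.modify, PySem.Dict.getD, mk_map_get?, pvKeys_append,
        PySem.Dict.insert]
      by_cases hm : pvKey r ∈ pvKeys rows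
      · -- existing key: in-place replacement of its group list
        rw [if_pos hm, if_pos (Or.inr hm), Option.getD_some]
        rw [show (PySem.Dict.mk ((pvKeys rows).map (fun k => (k, pvGrp rows k)))).contains (pvKey r) = true by
          rw [mk_map_contains]; simpa using hm]
        rw [if_pos rfl]
        congr 1
        simp only [List.map_map]
        apply List.map_congr_left
        intro k hk
        by_cases hkr : k = pvKey r
        · subst hkr; simp [Function.comp, pvGrp_append]
        · have hrk : pvKey r ≠ k := fun h => hkr h.symm
          simp [Function.comp, pvGrp_append, hkr, hrk]
      · -- new key: appended at the end with the singleton group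
        rw [if_neg hm, Option.getD_none]
        rw [show (PySem.Dict.mk ((pvKeys rows).map (fun k => (k, pvGrp rows k)))).contains (pvKey r) = false by
          rw [mk_map_contains]; simpa using hm]
        simp only [Bool.false_eq_true, if_false]
        rw [if_neg (show ¬(pvKey r = "" ∨ pvKey r ∈ pvKeys rows) by tauto)]
        congr 1
        simp only [List.map_append, List.map_cons, List.map_nil]
        congr 1
        · apply List.map_congr_left
          intro k hk
          rw [pvGrp_append]
          have hne : pvKey r ≠ k := fun h => hm (h ▸ hk)
          simp [hne]
        · rw [pvGrp_append]
          simp [pvGrp_eq_nil h0 hm]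

-- ===== VERDICT (by name: the statement is the Claim_ definition above) =====
theorem grouped_reprints_spec : Claim_equal_grouped_reprints := by
  intro rows _
  unfold Spec_grouped_reprints grouped_reprints grouped_reprints_alt
  rw [main_invariant]
  rfl
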